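-- pv_equiv track=rewrite | github.com/kyungminlee/fortran-migrator | src/pyengine/fortran_migrator.py | reformat_fixed_line
-- ===== SOURCE A (Python) =====
-- def is_comment_line(line: str) -> bool:
--     return bool(line) and line[0] in ('C', 'c', '*', '!')
--
-- def _build_split_mask(body: str) -> list[bool]:
--     mask = [True] * len(body)
--     in_string, quote_char, i = False, '', 0
--     while i < len(body):
--         ch = body[i]
--         if in_string:
--             mask[i] = False
--             if ch == quote_char:
--                 if i + 1 < len(body) and body[i + 1] == quote_char:
--                     mask[i + 1] = False
--                     i += 2
--                     continue
--                 in_string = False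
--         elif ch in ("'", '"'):
--             in_string, quote_char, mask[i] = True, ch, False
--         i += 1
--     return mask
--
-- def reformat_fixed_line(line: str, cont_char: str = '+') -> str:
--     # Preprocessor directives (``#if``, ``#include``, ``#define`` ...) are
--     # not bound by fixed-form column 72 and must not be split into
--     # continuation lines — doing so produces a truncated directive on
--     # the first line (e.g. ``#if A || B ||`` dangling) and a second line
--     # the preprocessor doesn't understand. Leave them alone regardless
--     # of length.
--     if line.lstrip().startswith('#'):
--         return line
--     if len(line) <= 72 or is_comment_line(line) or (len(line) > 6 and line[6:].lstrip().startswith('!')):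
--         return line
--     # If an inline ``!`` comment sits within the first 72 columns, keep
--     # the whole line intact — fixed-form Fortran ignores columns past
--     # 72, and we must NOT split across the comment (the text after
--     # ``!`` would otherwise land on a continuation line as code).
--     # Scan for the first ``!`` outside a string literal.
--     in_s = in_d = False
--     for i, ch in enumerate(line):
--         if ch == "'" and not in_d:
--             in_s = not in_s
--         elif ch == '"' and not in_s:
--             in_d = not in_d
--         elif ch == '!' and not in_s and not in_d:
--             if i < 72:
--                 return line
--             break
--     prefix, body = line[:6] if len(line) >= 6 else line.ljust(6), line[6:]
--     safe = _build_split_mask(body)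
--     chunks = []
--     while len(body) > 66:
--         split_pos = 66
--         for i in range(65, max(35, 65 - 30), -1):
--             if body[i] in (',', ' ') and safe[i]:
--                 split_pos = i + 1
--                 break
--         else:
--             for i in range(65, 0, -1):
--                 if safe[i]:
--                     split_pos = i
--                     break
--         chunks.append(body[:split_pos])
--         body, safe = body[split_pos:], safe[split_pos:]
--     chunks.append(body)
--     result_lines = [prefix + chunks[0]]
--     for chunk in chunks[1:]: result_lines.append('     ' + cont_char + chunk)
--     return '\n'.join(result_lines)
-- ===== SOURCE B (Python) =====
-- def is_comment_line(line: str) -> bool: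
--     return bool(line) and line[0] in ('C', 'c', '*', '!')
--
-- def _split_mask_dfa(body: str) -> list[bool]:
--     # One-char-at-a-time DFA, no lookahead: state 2 = "just saw the quote
--     # char while inside a string" (resolves doubled quotes on the next char).
--     mask = []
--     state, q = 0, ''
--     for ch in body:
--         if state == 2:
--             if ch == q:
--                 mask.append(False)
--                 state = 1
--             elif ch in ("'", '"'):
--                 mask.append(False)
--                 q = ch
--                 state = 1
--             else:
--                 mask.append(True)
--                 state = 0
--         elif state == 1:
--             mask.append(False)
--             if ch == q:
--                 state = 2
--         else:
--             if ch in ("'", '"'):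
--                 mask.append(False)
--                 q = ch
--                 state = 1
--             else:
--                 mask.append(True)
--     return mask
--
-- def reformat_fixed_line(line: str, cont_char: str = '+') -> str:
--     if line.lstrip().startswith('#'):
--         return line
--     if len(line) <= 72 or is_comment_line(line) or (len(line) > 6 and line[6:].lstrip().startswith('!')):
--         return line
--     in_s = in_d = False
--     for i, ch in enumerate(line):
--         if ch == "'" and not in_d:
--             in_s = not in_s
--         elif ch == '"' and not in_s:
--             in_d = not in_d
--         elif ch == '!' and not in_s and not in_d:
--             if i < 72:
--                 return line
--             break
--     prefix, body = line[:6] if len(line) >= 6 else line.ljust(6), line[6:]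
--     safe = _split_mask_dfa(body)
--     # Forward pass over absolute positions: for each 66-wide window scan the
--     # candidate columns once, remembering the best comma/space break and the
--     # best safe break; no backward scans, no re-slicing of body/safe.
--     out = prefix
--     s, first = 0, True
--     while len(body) - s > 66:
--         best_cs = best_safe = None
--         for i in range(1, 66):
--             ch = body[s + i]
--             if i >= 36 and (ch == ',' or ch == ' ') and safe[s + i]:
--                 best_cs = i
--             if safe[s + i]:
--                 best_safe = i
--         if best_cs is not None:
--             cut = s + best_cs + 1
--         elif best_safe is not None:
--             cut = s + best_safe
--         else:
--             cut = s + 66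
--         if first:
--             out += body[s:cut]
--             first = False
--         else:
--             out += '\n     ' + cont_char + body[s:cut]
--         s = cut
--     if first:
--         out += body[s:]
--     else:
--         out += '\n     ' + cont_char + body[s:]
--     return out
-- ===== Notes on version B (the rewrite author's own statement) =====
-- stated objective: faster
-- what changed: The separate lookahead mask builder plus per-chunk backward scans over repeatedly re-sliced body/safe lists are replaceded by a lookahead-free quote DFA and a single forward window scan over absolute positions that tracks the best comma/space break and the best safe break, emitting the output string incrementally.
import Mathlib
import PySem

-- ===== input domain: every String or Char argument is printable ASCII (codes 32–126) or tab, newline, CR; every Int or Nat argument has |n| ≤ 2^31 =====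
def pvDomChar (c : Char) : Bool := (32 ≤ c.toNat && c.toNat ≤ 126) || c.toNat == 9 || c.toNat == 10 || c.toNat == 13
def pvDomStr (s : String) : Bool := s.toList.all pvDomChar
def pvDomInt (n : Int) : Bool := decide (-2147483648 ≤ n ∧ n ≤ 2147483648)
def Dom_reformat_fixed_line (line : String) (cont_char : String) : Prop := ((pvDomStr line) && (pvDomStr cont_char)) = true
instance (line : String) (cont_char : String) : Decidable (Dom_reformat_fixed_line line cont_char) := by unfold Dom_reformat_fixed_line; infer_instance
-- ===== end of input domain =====

-- B replaces A's mask-builder-with-lookahead + per-chunk backward scans over re-sliced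
-- body/safe by a lookahead-free quote DFA and a single forward window scan over absolute
-- positions tracking the best comma/space break and the best safe break (objective: alternative).


-- ===== PORT A =====

-- module helper is_comment_line (textually identical in Source A and Source B; shared by both ports)
def isCommentLine (cs : List Char) : Bool :=
  !cs.isEmpty && (cs.headD ' ' == 'C' || cs.headD ' ' == 'c' || cs.headD ' ' == '*' || cs.headD ' ' == '!')

-- the inline-'!' pre-scan (the enumerate loop; textually identical in Source A and Source B, shared):
-- returns true exactly when the Python loop executes `return line` (a '!' outside strings before column 72)
def bangScan : List Char → Nat → Bool → Bool → Bool
  | [], _, _, _ => false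
  | ch :: rest, i, in_s, in_d =>
    if ch == '\'' && !in_d then bangScan rest (i + 1) (!in_s) in_d
    else if ch == '"' && !in_s then bangScan rest (i + 1) in_s (!in_d)
    else if ch == '!' && !in_s && !in_d then decide (i < 72)
    else bangScan rest (i + 1) in_s in_d

-- _build_split_mask: A's while-loop with lookahead (i += 2 on a doubled quote) as
-- structural recursion emitting one or two mask bits per step
def maskA : Bool → Char → List Char → List Bool
  | false, _, [] => []
  | false, q, ch :: rest =>
    if ch == '\'' || ch == '"' then false :: maskA true ch rest
    else true :: maskA false q rest
  | true, _, [] => []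
  | true, q, ch :: rest =>
    if ch == q then
      match rest with
      | [] => [false]
      | c :: r => if c == q then false :: false :: maskA true q r
                  else false :: maskA false q (c :: r)
    else false :: maskA true q rest

-- A's two backward `for … break` scans (= first match of the descending range = List.find?);
-- body[i]/safe[i] are always in range where this is called (len(body) > 66, i ≤ 65), ported as getD
def splitPosA (body : List Char) (safe : List Bool) : Nat :=
  -- range(65, 35, -1)
  match ((List.range' 36 30).reverse).find?
      (fun i => (body.getD i ' ' == ',' || body.getD i ' ' == ' ') && safe.getD i false) with
  | some i => i + 1
  | none =>
    -- range(65, 0, -1)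
    match ((List.range' 1 65).reverse).find? (fun i => safe.getD i false) with
    | some i => i
    | none => 66

-- needed by chunksA's termination argument
lemma splitPosA_pos (body : List Char) (safe : List Bool) : 0 < splitPosA body safe := by
  unfold splitPosA
  rcases h1 : ((List.range' 36 30).reverse).find?
      (fun i => (body.getD i ' ' == ',' || body.getD i ' ' == ' ') && safe.getD i false) with _ | i
  · rcases h2 : ((List.range' 1 65).reverse).find? (fun i => safe.getD i false) with _ | j
    · simp
    · have := List.mem_of_find?_eq_some h2
      rw [List.mem_reverse, List.mem_range'_1] at this
      simp only []
      omega
  · simp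

-- the `while len(body) > 66` loop of A: chop, re-slice body and safe
def chunksA (body : List Char) (safe : List Bool) : List (List Char) :=
  if _h : 66 < body.length then
    let sp := splitPosA body safe
    body.take sp :: chunksA (body.drop sp) (safe.drop sp)
  else [body]
termination_by body.length
decreasing_by
  have := splitPosA_pos body safe
  simp only [List.length_drop]
  omega

def reformat_fixed_line (line : String) (cont_char : String) : String :=
  let cs := line.toList
  if PySem.Chars.startswith (PySem.Chars.lstrip cs) ['#'] then line
  else if decide (cs.length ≤ 72) || isCommentLine cs
      || (decide (6 < cs.length) && PySem.Chars.startswith (PySem.Chars.lstrip (cs.drop 6)) ['!']) then line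
  else if bangScan cs 0 false false then line
  else
    let pre := if 6 ≤ cs.length then cs.take 6 else cs ++ List.replicate (6 - cs.length) ' '
    let body := cs.drop 6
    let safe := maskA false ' ' body
    match chunksA body safe with
    | [] => ""   -- unreachable: chunksA always returns at least one chunk
    | c0 :: rest =>
      String.mk (PySem.Chars.join ['\n']
        ((pre ++ c0) :: rest.map (fun c => ' ' :: ' ' :: ' ' :: ' ' :: ' ' :: (cont_char.toList ++ c))))

-- ===== PORT B =====

-- _split_mask_dfa: lookahead-free DFA, state 2 = "just saw the quote char inside a string"
def maskB : Nat → Char → List Char → List Bool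
  | _, _, [] => []
  | st, q, ch :: rest =>
    if st == 2 then
      if ch == q then false :: maskB 1 q rest
      else if ch == '\'' || ch == '"' then false :: maskB 1 ch rest
      else true :: maskB 0 q rest
    else if st == 1 then
      if ch == q then false :: maskB 2 q rest else false :: maskB 1 q rest
    else
      if ch == '\'' || ch == '"' then false :: maskB 1 ch rest
      else true :: maskB 0 q rest

-- B's single forward window scan (for i in range(1, 66)) tracking both break candidates;
-- indices s+i are always in range where this is called, ported as getD
def scanWinB (body : List Char) (safe : List Bool) (s : Nat) : Option Nat × Option Nat :=
  (List.range' 1 65).foldl (fun acc i =>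
    ((if decide (36 ≤ i) && (body.getD (s + i) ' ' == ',' || body.getD (s + i) ' ' == ' ')
          && safe.getD (s + i) false then some i else acc.1),
     (if safe.getD (s + i) false then some i else acc.2))) (none, none)

def cutB (body : List Char) (safe : List Bool) (s : Nat) : Nat :=
  match scanWinB body safe s with
  | (some i, _) => s + i + 1
  | (none, some i) => s + i
  | (none, none) => s + 66

-- the next three lemmas are needed (transitively) by emitB's termination argument
lemma foldl_lastMatch (p : Nat → Bool) (l : List Nat) (a0 : Option Nat) :
    l.foldl (fun acc i => if p i then some i else acc) a0 = (l.reverse.find? p).or a0 := by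
  induction l generalizing a0 with
  | nil => simp
  | cons x xs ih =>
    simp only [List.foldl_cons, ih, List.reverse_cons, List.find?_append]
    rcases h : xs.reverse.find? p with _ | v <;> cases hp : p x <;> simp [List.find?, hp]

lemma scanWinB_eq (body : List Char) (safe : List Bool) (s : Nat) :
    scanWinB body safe s =
      (((List.range' 1 65).reverse).find? (fun i => decide (36 ≤ i)
          && (body.getD (s + i) ' ' == ',' || body.getD (s + i) ' ' == ' ')
          && safe.getD (s + i) false),
       ((List.range' 1 65).reverse).find? (fun i => safe.getD (s + i) false)) := by
  unfold scanWinB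
  rw [PySem.List.foldl_prod_mk
    (fun a i => if decide (36 ≤ i) && (body.getD (s + i) ' ' == ',' || body.getD (s + i) ' ' == ' ')
          && safe.getD (s + i) false then some i else a)
    (fun b i => if safe.getD (s + i) false then some i else b)]
  rw [foldl_lastMatch, foldl_lastMatch, Option.or_none, Option.or_none]

lemma cutB_gt (body : List Char) (safe : List Bool) (s : Nat) : s < cutB body safe s := by
  unfold cutB
  rw [scanWinB_eq]
  rcases h1 : ((List.range' 1 65).reverse).find? (fun i => decide (36 ≤ i)
      && (body.getD (s + i) ' ' == ',' || body.getD (s + i) ' ' == ' ')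
      && safe.getD (s + i) false) with _ | i
  · rcases h2 : ((List.range' 1 65).reverse).find? (fun i => safe.getD (s + i) false) with _ | j
    · simp
    · have := List.mem_of_find?_eq_some h2
      rw [List.mem_reverse, List.mem_range'_1] at this
      simp
      omega
  · simp

-- B's `while len(body) - s > 66` emission loop: absolute index s, output accumulated directly
def emitB (body : List Char) (safe : List Bool) (cc : List Char) (s : Nat)
    (out : List Char) (first : Bool) : List Char :=
  if _h : 66 < body.length - s then
    let cut := cutB body safe s
    let piece := (body.drop s).take (cut - s)   -- body[s:cut]
    emitB body safe cc cut
      (out ++ (if first then piece else '\n' :: ' ' :: ' ' :: ' ' :: ' ' :: ' ' :: (cc ++ piece)))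
      false
  else
    out ++ (if first then body.drop s else '\n' :: ' ' :: ' ' :: ' ' :: ' ' :: ' ' :: (cc ++ body.drop s))
termination_by body.length - s
decreasing_by
  have := cutB_gt body safe s
  omega

def reformat_fixed_line_alt (line : String) (cont_char : String) : String :=
  let cs := line.toList
  if PySem.Chars.startswith (PySem.Chars.lstrip cs) ['#'] then line
  else if decide (cs.length ≤ 72) || isCommentLine cs
      || (decide (6 < cs.length) && PySem.Chars.startswith (PySem.Chars.lstrip (cs.drop 6)) ['!']) then line
  else if bangScan cs 0 false false then line
  else
    let pre := if 6 ≤ cs.length then cs.take 6 else cs ++ List.replicate (6 - cs.length) ' '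
    let body := cs.drop 6
    let safe := maskB 0 ' ' body
    String.mk (emitB body safe cont_char.toList 0 pre true)

-- ===== PRECONDITION & SPEC =====
def Spec_reformat_fixed_line (line : String) (cont_char : String) (out : String) : Prop := out = reformat_fixed_line_alt line cont_char
instance (line : String) (cont_char : String) (out : String) : Decidable (Spec_reformat_fixed_line line cont_char out) := by unfold Spec_reformat_fixed_line; infer_instance

-- ===== CLAIM (what is proved, stated in full; the proofs are below) =====
def Claim_equal_reformat_fixed_line : Prop := ∀ (line : String) (cont_char : String), Dom_reformat_fixed_line line cont_char → Spec_reformat_fixed_line line cont_char (reformat_fixed_line line cont_char)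

-- ===== LEMMAS AND PROOFS =====

-- the two mask builders agree (strong induction; A's step eats one or two characters)
lemma mask_eq_aux (n : Nat) : ∀ (body : List Char), body.length ≤ n → ∀ q,
    maskA false q body = maskB 0 q body ∧ maskA true q body = maskB 1 q body := by
  induction n with
  | zero =>
    intro body hb q
    have : body = [] := List.eq_nil_of_length_eq_zero (Nat.le_zero.mp hb)
    subst this; exact ⟨rfl, rfl⟩
  | succ n ih =>
    intro body hb q
    match body with
    | [] => exact ⟨rfl, rfl⟩
    | ch :: rest =>
      have hr : rest.length ≤ n := by simpa using Nat.succ_le_succ_iff.mp (by simpa using hb)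
      constructor
      · by_cases hq : (ch == '\'' || ch == '"') = true
        · simp [maskA, maskB, hq, (ih rest hr ch).2]
        · simp [maskA, maskB, hq, (ih rest hr q).1]
      · by_cases hq : (ch == q) = true
        · match rest with
          | [] => simp [maskA, maskB, hq]
          | c :: r =>
            have hrr : r.length ≤ n := by simp at hr ⊢; omega
            by_cases hc : (c == q) = true
            · simp [maskA, maskB, hq, hc, (ih r hrr q).2]
            · by_cases hc2 : (c == '\'' || c == '"') = true
              · simp [maskA, maskB, hq, hc, hc2, (ih r hrr c).2]
              · simp [maskA, maskB, hq, hc, hc2, (ih r hrr q).1]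
        · rw [maskA.eq_def, maskB.eq_def]
          simp [hq, (ih rest hr q).2]

lemma mask_eq (body : List Char) (q : Char) : maskA false q body = maskB 0 q body :=
  (mask_eq_aux body.length body le_rfl q).1

lemma find?_congr_mem {p q : Nat → Bool} {l : List Nat} (h : ∀ x ∈ l, p x = q x) :
    l.find? p = l.find? q := by
  induction l with
  | nil => rfl
  | cons x xs ih =>
    simp only [List.find?]
    rw [h x (by simp)]
    cases hq : q x
    · exact ih (fun y hy => h y (by simp [hy]))
    · rfl

lemma getD_drop {α : Type} (l : List α) (s i : Nat) (d : α) :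
    (l.drop s).getD i d = l.getD (s + i) d := by
  simp [List.getD_eq_getElem?_getD, List.getElem?_drop]

-- B's absolute cut over the window at s = A's split position on the sliced body/safe
lemma cutB_eq (body : List Char) (safe : List Bool) (s : Nat) :
    cutB body safe s = s + splitPosA (body.drop s) (safe.drop s) := by
  unfold cutB splitPosA
  rw [scanWinB_eq]
  simp only [getD_drop]
  have hsplit : List.range' 1 65 = List.range' 1 35 ++ List.range' 36 30 := by decide
  have h1 : ((List.range' 1 65).reverse).find? (fun i => decide (36 ≤ i)
        && (body.getD (s + i) ' ' == ',' || body.getD (s + i) ' ' == ' ')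
        && safe.getD (s + i) false)
      = ((List.range' 36 30).reverse).find?
        (fun i => (body.getD (s + i) ' ' == ',' || body.getD (s + i) ' ' == ' ')
          && safe.getD (s + i) false) := by
    rw [hsplit, List.reverse_append, List.find?_append]
    have hnone : ((List.range' 1 35).reverse).find? (fun i => decide (36 ≤ i)
        && (body.getD (s + i) ' ' == ',' || body.getD (s + i) ' ' == ' ')
        && safe.getD (s + i) false) = none := by
      rw [List.find?_eq_none]
      intro x hx
      rw [List.mem_reverse, List.mem_range'_1] at hx
      have : decide (36 ≤ x) = false := by simp; omega
      simp [this]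
    have hcongr : ((List.range' 36 30).reverse).find? (fun i => decide (36 ≤ i)
        && (body.getD (s + i) ' ' == ',' || body.getD (s + i) ' ' == ' ')
        && safe.getD (s + i) false)
      = ((List.range' 36 30).reverse).find?
        (fun i => (body.getD (s + i) ' ' == ',' || body.getD (s + i) ' ' == ' ')
          && safe.getD (s + i) false) := by
      apply find?_congr_mem
      intro x hx
      rw [List.mem_reverse, List.mem_range'_1] at hx
      have : decide (36 ≤ x) = true := by simp; omega
      simp [this]
    rw [hcongr, hnone, Option.or_none]
  rw [h1]
  rcases ha : ((List.range' 36 30).reverse).find?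
      (fun i => (body.getD (s + i) ' ' == ',' || body.getD (s + i) ' ' == ' ')
        && safe.getD (s + i) false) with _ | i
  · rcases hb : ((List.range' 1 65).reverse).find? (fun i => safe.getD (s + i) false) with _ | j
    · rfl
    · rfl
  · simp
    omega

-- continuation chunks rendered as B renders them ('\n' + 5 spaces + cont_char + chunk each)
def tailRender (cc : List Char) (chunks : List (List Char)) : List Char :=
  (chunks.map (fun c => '\n' :: ' ' :: ' ' :: ' ' :: ' ' :: ' ' :: (cc ++ c))).flatten

lemma emitB_false (body : List Char) (safe : List Bool) (cc : List Char) :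
    ∀ (n s : Nat), body.length - s ≤ n → ∀ (out : List Char),
    emitB body safe cc s out false = out ++ tailRender cc (chunksA (body.drop s) (safe.drop s)) := by
  intro n
  induction n with
  | zero =>
    intro s hs out
    rw [emitB, chunksA]
    have h1 : ¬ 66 < body.length - s := by omega
    have h2 : ¬ 66 < (body.drop s).length := by simp only [List.length_drop]; omega
    simp [h1, tailRender]
  | succ n ih =>
    intro s hs out
    rw [emitB, chunksA]
    by_cases h : 66 < body.length - s
    · have h2 : 66 < (body.drop s).length := by simp only [List.length_drop]; omega
      simp only [h, h2, dif_pos, if_neg Bool.false_ne_true]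
      have hcut : cutB body safe s = s + splitPosA (body.drop s) (safe.drop s) := cutB_eq body safe s
      have hsp := splitPosA_pos (body.drop s) (safe.drop s)
      have hrec := ih (cutB body safe s) (by omega) 
        (out ++ '\n' :: ' ' :: ' ' :: ' ' :: ' ' :: ' ' ::
          (cc ++ (body.drop s).take (cutB body safe s - s)))
      rw [hrec]
      have hdd : body.drop (cutB body safe s) =
          (body.drop s).drop (splitPosA (body.drop s) (safe.drop s)) := by
        rw [List.drop_drop, hcut]
      have hdd2 : safe.drop (cutB body safe s) =
          (safe.drop s).drop (splitPosA (body.drop s) (safe.drop s)) := by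
        rw [List.drop_drop, hcut]
      rw [hdd, hdd2, hcut]
      simp [tailRender]
    · have h2 : ¬ 66 < (body.drop s).length := by simp only [List.length_drop]; omega
      simp [h, tailRender]

lemma join_render (cc : List Char) (rest : List (List Char)) :
    ∀ (x : List Char),
    PySem.Chars.join ['\n']
      (x :: rest.map (fun c => ' ' :: ' ' :: ' ' :: ' ' :: ' ' :: (cc ++ c)))
      = x ++ tailRender cc rest := by
  induction rest with
  | nil => intro x; simp [PySem.Chars.join_singleton, tailRender]
  | cons c cs ih =>
    intro x
    simp only [List.map_cons, PySem.Chars.join_cons_cons, ih]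
    simp [tailRender]

-- ===== VERDICT (by name: the statement is the Claim_ definition above) =====
theorem reformat_fixed_line_spec : Claim_equal_reformat_fixed_line := by
  unfold Claim_equal_reformat_fixed_line
  intro line cont_char _
  unfold Spec_reformat_fixed_line reformat_fixed_line reformat_fixed_line_alt
  simp only []
  split_ifs with g1 g2 g3 g4
  · rfl
  · rfl
  · rfl
  · -- the core: body is long (length > 66), masks agree, chunk loops agree
    have hlen : 72 < line.toList.length := by
      by_contra hl
      apply g2
      have hl2 : line.toList.length ≤ 72 := by omega
      simp only [Bool.or_eq_true, decide_eq_true_eq]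
      exact Or.inl (Or.inl hl2)
    rw [← mask_eq _ ' ']
    set cs := line.toList with hcs
    set body := cs.drop 6 with hbody
    set safe := maskA false ' ' body with hsafe
    have hblen : 66 < body.length := by
      rw [hbody, List.length_drop]; omega
    -- unfold one step of emitB (s = 0, first = true)
    rw [emitB]
    have h0 : 66 < body.length - 0 := by omega
    simp only [h0, dif_pos, if_pos]
    have hcut : cutB body safe 0 = splitPosA body safe := by
      have := cutB_eq body safe 0
      simpa using this
    rw [emitB_false body safe cont_char.toList (body.length - cutB body safe 0) _ le_rfl]
    -- unfold one step of chunksA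
    rw [chunksA]
    simp only [hblen, dif_pos]
    rw [join_render]
    simp [hcut]
  · -- the ljust branch: unreachable, the line is longer than 72 characters
    exfalso
    have hlen : 72 < line.toList.length := by
      by_contra hl
      apply g2
      have hl2 : line.toList.length ≤ 72 := by omega
      simp only [Bool.or_eq_true, decide_eq_true_eq]
      exact Or.inl (Or.inl hl2)
    omega
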